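-- pv_equiv track=rewrite | github.com/aravindraj777/Pycoders-DSA | leetcodeDSA/Partition_Array.py | maxWaysToPartition
-- ===== SOURCE A (Python) =====
-- from collections import Counter
--
-- def maxWaysToPartition(nums):
--     n = len(nums)
--     prefix = [0] * (n + 1)
--
--     for i in range(n):
--         prefix[i + 1] = prefix[i] + nums[i]
--
--     total = prefix[-1]
--     left_count = Counter()
--     right_count = Counter()
--
--     for i in range(1, n):
--         right_count[prefix[i]] += 1
--
--     max_partitions = right_count[total // 2] if total % 2 == 0 else 0
--
--     for i in range(n):
--         diff = nums[i]
--         new_partitions = 0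
--
--         for new_val in set(nums):
--             change = new_val - diff
--             new_total = total + change
--             if new_total % 2 == 0:
--                 mid = new_total // 2
--                 new_partitions = left_count[mid] + right_count[mid]
--
--             max_partitions = max(max_partitions, new_partitions)
--
--         if i + 1 < n:
--             left_count[prefix[i + 1]] += 1
--             right_count[prefix[i + 1]] -= 1
--
--     return max_partitions
-- ===== SOURCE B (Python) =====
-- from collections import Counter
-- from itertools import accumulate
--
-- def maxWaysToPartition(nums):
--     prefix = [0] + list(accumulate(nums))
--     total = prefix[-1]
--     cnt = Counter(prefix[1:-1])
--     best = cnt[total // 2] if total % 2 == 0 else 0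
--     vals = list(dict.fromkeys(nums))
--     for a in vals:
--         for b in vals:
--             nt = total + b - a
--             if nt % 2 == 0:
--                 best = max(best, cnt[nt // 2])
--     return best
-- ===== Notes on version B (the rewrite author's own statement) =====
-- stated objective: faster
-- what changed: Exploits that left_count[mid]+right_count[mid] in A is the position-independent count of mid among all interior prefix sums, so B drops the left/right counter maintenance and the per-position scan and instead loops once over pairs of distinct values, looking mid up in one precomputed Counter of the interior prefix sums.
import Mathlib
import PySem

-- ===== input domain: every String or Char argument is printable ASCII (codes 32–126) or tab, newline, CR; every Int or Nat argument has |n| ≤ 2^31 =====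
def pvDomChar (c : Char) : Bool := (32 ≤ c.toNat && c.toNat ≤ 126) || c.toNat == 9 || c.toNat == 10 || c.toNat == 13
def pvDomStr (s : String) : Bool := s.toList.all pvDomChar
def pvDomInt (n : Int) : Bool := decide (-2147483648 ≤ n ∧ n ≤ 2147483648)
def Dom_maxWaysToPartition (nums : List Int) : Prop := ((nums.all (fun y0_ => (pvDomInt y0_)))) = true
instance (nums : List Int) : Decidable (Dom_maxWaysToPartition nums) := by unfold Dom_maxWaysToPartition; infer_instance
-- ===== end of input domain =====

-- B replaces A's per-position scan with left/right counters by one precomputed counter of the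
-- interior prefix sums and a loop over pairs of distinct values (objective: faster).

-- ===== PORT A =====
-- the fill loop 'prefix[i+1] = prefix[i] + nums[i]' carries (list built so far, last written entry)
def pvScanStep (st : List Int × Int) (x : Int) : List Int × Int := (st.1 ++ [st.2 + x], st.2 + x)

-- body of 'for new_val in set(nums): …'
def pvInnerStepA (total : Int) (l r : PySem.Dict Int Int) (diff : Int) (s : Int × Int) (newVal : Int) : Int × Int :=
  let change := newVal - diff
  let newTotal := total + change
  let np :=
    if PySem.Int.mod newTotal 2 == 0 then
      l.getD (PySem.Int.floordiv newTotal 2) 0 + r.getD (PySem.Int.floordiv newTotal 2) 0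
    else s.1
  (np, max s.2 np)

-- body of 'for i in range(n): …'; state = ((left_count, right_count), max_partitions),
-- ip = (i, (nums[i], prefix[i+1]))
def pvStepA (n total : Int) (vals : List Int)
    (st : (PySem.Dict Int Int × PySem.Dict Int Int) × Int) (ip : Int × (Int × Int)) :
    (PySem.Dict Int Int × PySem.Dict Int Int) × Int :=
  let inner := vals.foldl (pvInnerStepA total st.1.1 st.1.2 ip.2.1) (0, st.2)
  if ip.1 + 1 < n then
    ((st.1.1.modify ip.2.2 0 (· + 1), st.1.2.modify ip.2.2 0 (· - 1)), inner.2)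
  else ((st.1.1, st.1.2), inner.2)

def maxWaysToPartition (nums : List Int) : Int :=
  let n : Int := PySem.List.len nums
  let pre := (nums.foldl pvScanStep ([0], (0 : Int))).1
  let total := PySem.List.pyGetD pre (-1) 0
  let leftCount : PySem.Dict Int Int := PySem.Dict.empty
  -- 'for i in range(1, n): right_count[prefix[i]] += 1' reads prefix[1], …, prefix[n-1] in order
  let rightCount : PySem.Dict Int Int :=
    (PySem.List.slice pre (some 1) (some n)).foldl (fun d p => d.modify p 0 (· + 1)) PySem.Dict.empty
  let maxPartitions : Int :=
    if PySem.Int.mod total 2 == 0 then rightCount.getD (PySem.Int.floordiv total 2) 0 else 0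
  -- 'for i in range(n)' reading nums[i] and prefix[i+1]: enumerate(zip(nums, prefix[1:]))
  let res :=
    (PySem.List.enumerate (nums.zip (PySem.List.slice pre (some 1) none))).foldl
      (pvStepA n total (PySem.Set.ofList nums)) ((leftCount, rightCount), maxPartitions)
  res.2

-- ===== PORT B =====
-- body of 'for b in vals: …'
def pvInnerStepB (total : Int) (cnt : PySem.Dict Int Int) (a best b : Int) : Int :=
  let nt := total + b - a
  if PySem.Int.mod nt 2 == 0 then max best (cnt.getD (PySem.Int.floordiv nt 2) 0) else best

def maxWaysToPartition_alt (nums : List Int) : Int :=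
  -- prefix = [0] + list(accumulate(nums))
  let pre := [0] ++ (nums.foldl pvScanStep ([], (0 : Int))).1
  let total := PySem.List.pyGetD pre (-1) 0
  let cnt : PySem.Dict Int Int := PySem.Dict.counter (PySem.List.slice pre (some 1) (some (-1)))
  let best : Int :=
    if PySem.Int.mod total 2 == 0 then cnt.getD (PySem.Int.floordiv total 2) 0 else 0
  let vals := PySem.List.dedup nums   -- list(dict.fromkeys(nums))
  vals.foldl (fun best a => vals.foldl (pvInnerStepB total cnt a) best) best

-- ===== PRECONDITION & SPEC =====
def Spec_maxWaysToPartition (nums : List Int) (out : Int) : Prop := out = maxWaysToPartition_alt nums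
instance (nums : List Int) (out : Int) : Decidable (Spec_maxWaysToPartition nums out) := by unfold Spec_maxWaysToPartition; infer_instance

-- ===== CLAIM (what is proved, stated in full; the proofs are below) =====
def Claim_equal_maxWaysToPartition : Prop := ∀ (nums : List Int), Dom_maxWaysToPartition nums → Spec_maxWaysToPartition nums (maxWaysToPartition nums)

-- ===== LEMMAS AND PROOFS =====

-- the list of running prefix sums of l starting from s (without the leading s)
def pvPre (l : List Int) (s : Int) : List Int :=
  match l with
  | [] => []
  | x :: t => (s + x) :: pvPre t (s + x)

theorem pvScan_eq (l : List Int) : ∀ (acc : List Int) (s : Int),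
    l.foldl pvScanStep (acc, s) = (acc ++ pvPre l s, s + l.sum) := by
  induction l with
  | nil => intro acc s; simp [pvPre]
  | cons x t ih =>
      intro acc s
      simp only [List.foldl_cons, pvScanStep, pvPre, ih, List.sum_cons]
      simp [List.append_assoc, add_assoc]

theorem pvPre_length (l : List Int) : ∀ s, (pvPre l s).length = l.length := by
  induction l with
  | nil => intro s; simp [pvPre]
  | cons x t ih => intro s; simp [pvPre, ih]

-- slice xs[1:-1] on a cons cell
theorem pvSlice_one_neg_one (a : Int) (t : List Int) :
    PySem.List.slice (a :: t) (some 1) (some (-1)) = t.dropLast := by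
  simp only [PySem.List.slice, PySem.List.clampIdx, List.length_cons]
  norm_num
  rw [List.dropLast_eq_take]
  cases t with
  | nil => simp
  | cons y ys =>
      rw [if_neg (by omega : ¬ ((((y :: ys).length : Nat) : Int) < 0))]

-- slice xs[1:n] with n = length - 1
theorem pvSlice_one_n (a : Int) (t : List Int) :
    PySem.List.slice (a :: t) (some 1) (some (t.length : Int)) = t.dropLast := by
  have := PySem.List.slice_natCast (a :: t) 1 t.length
  rw [show ((1:Nat) : Int) = (1 : Int) from rfl] at this
  rw [this, List.dropLast_eq_take]
  simp

-- candidate list of one 'a': the values looked up for each b with an even shifted total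
def pvCands (C : Int → Int) (T : Int) (vs : List Int) (a : Int) : List Int :=
  vs.filterMap (fun b =>
    if PySem.Int.mod (T + b - a) 2 == 0 then some (C (PySem.Int.floordiv (T + b - a) 2)) else none)

-- B's inner loop is a max-fold over the candidate list
theorem pvInnerB_eq (T : Int) (cnt : PySem.Dict Int Int) (a : Int) (vs : List Int) :
    ∀ mp : Int, vs.foldl (pvInnerStepB T cnt a) mp
      = (pvCands (fun m => cnt.getD m 0) T vs a).foldl max mp := by
  induction vs with
  | nil => intro mp; simp [pvCands]
  | cons b t ih =>
      intro mp
      simp only [List.foldl_cons, pvCands, List.filterMap_cons, pvInnerStepB]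
      by_cases h : (PySem.Int.mod (T + b - a) 2 == 0) = true
      · rw [if_pos h, if_pos h, List.foldl_cons]
        simpa [pvCands] using ih (max mp (cnt.getD (PySem.Int.floordiv (T + b - a) 2) 0))
      · rw [if_neg h, if_neg h]
        simpa [pvCands] using ih mp

-- A's inner loop (with the counter-sum invariant) computes the same max-fold
theorem pvInnerA_eq (T : Int) (l r : PySem.Dict Int Int) (C : Int → Int)
    (hlr : ∀ m, l.getD m 0 + r.getD m 0 = C m) (hC : ∀ m, 0 ≤ C m) (a : Int) :
    ∀ (vs : List Int) (np mp : Int), 0 ≤ np → np ≤ mp →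
    (vs.foldl (pvInnerStepA T l r a) (np, mp)).2
      = (pvCands C T vs a).foldl max mp := by
  intro vs
  induction vs with
  | nil => intro np mp h0 h1; simp [pvCands]
  | cons b t ih =>
      intro np mp h0 h1
      have harith : T + (b - a) = T + b - a := by ring
      simp only [List.foldl_cons, pvInnerStepA, harith, pvCands, List.filterMap_cons]
      by_cases h : (PySem.Int.mod (T + b - a) 2 == 0) = true
      · simp only [if_pos h, hlr]
        simpa [pvCands] using
          ih (C (PySem.Int.floordiv (T + b - a) 2)) (max mp (C (PySem.Int.floordiv (T + b - a) 2)))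
            (hC _) (le_max_right _ _)
      · simp only [if_neg h]
        rw [max_eq_left h1]
        simpa [pvCands] using ih np mp h0 h1

-- A's main loop: the counters' pointwise sum never changes, so the result is the
-- fold of the candidate max-folds over the elements of nums
theorem pvOuterA_eq (n T : Int) (vs : List Int) (C : Int → Int) (hC : ∀ m, 0 ≤ C m) :
    ∀ (l ps : List Int) (k : Int) (left right : PySem.Dict Int Int) (mp : Int),
      (∀ m, left.getD m 0 + right.getD m 0 = C m) → 0 ≤ mp →
      l.length ≤ ps.length →
      ((PySem.List.enumerate (l.zip ps) k).foldl (pvStepA n T vs) ((left, right), mp)).2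
        = l.foldl (fun mp a => (pvCands C T vs a).foldl max mp) mp := by
  intro l
  induction l with
  | nil => intro ps k left right mp hlr hmp hlen; simp
  | cons x t ih =>
      intro ps k left right mp hlr hmp hlen
      cases ps with
      | nil => simp at hlen
      | cons p pt =>
          simp only [List.zip_cons_cons, PySem.List.enumerate_cons, List.foldl_cons]
          have hinner :
              (vs.foldl (pvInnerStepA T left right x) (0, mp)).2
                = (pvCands C T vs x).foldl max mp :=
            pvInnerA_eq T left right C hlr hC x vs 0 mp le_rfl hmp
          have hmp' : 0 ≤ (pvCands C T vs x).foldl max mp :=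
            le_trans hmp (PySem.List.le_foldl_max _ _).1
          show ((PySem.List.enumerate (t.zip pt) (k + 1)).foldl (pvStepA n T vs)
              (pvStepA n T vs ((left, right), mp) (k, (x, p)))).2 = _
          rw [pvStepA]
          simp only [hinner]
          have hinv : ∀ m, ((left.modify p 0 (· + 1)).getD m 0) + ((right.modify p 0 (· - 1)).getD m 0) = C m := by
            intro m
            rw [PySem.Dict.getD_modify, PySem.Dict.getD_modify]
            by_cases hm : m = p
            · subst hm
              simp only [if_true]
              have := hlr m
              omega
            · simp only [if_neg hm]; exact hlr m
          by_cases hg : k + 1 < n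
          · rw [if_pos hg, ih pt (k + 1) _ _ _ hinv hmp' (by simpa using hlen)]
          · rw [if_neg hg, ih pt (k + 1) _ _ _ hlr hmp' (by simpa using hlen)]

-- folding the per-element max-folds is one max-fold over the concatenated candidates
theorem pvFlat_eq (C : Int → Int) (T : Int) (vs : List Int) :
    ∀ (l : List Int) (init : Int),
      l.foldl (fun mp a => (pvCands C T vs a).foldl max mp) init
        = (l.flatMap (pvCands C T vs)).foldl max init := by
  intro l
  induction l with
  | nil => intro init; simp
  | cons x t ih => intro init; simp only [List.foldl_cons, List.flatMap_cons, List.foldl_append, ih]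

theorem pvFoldlMax_mem_or (xs : List Int) : ∀ init : Int,
    xs.foldl max init = init ∨ xs.foldl max init ∈ xs := by
  induction xs with
  | nil => intro init; simp
  | cons x t ih =>
      intro init
      simp only [List.foldl_cons]
      rcases ih (max init x) with h | h
      · rcases max_choice init x with hm | hm
        · left; rw [h, hm]
        · right; rw [h, hm]; simp
      · right; simp [h]

theorem pvFoldlMax_congr (xs ys : List Int) (h : ∀ x, x ∈ xs ↔ x ∈ ys) (init : Int) :
    xs.foldl max init = ys.foldl max init := by
  apply le_antisymm
  · rcases pvFoldlMax_mem_or xs init with hx | hx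
    · rw [hx]; exact (PySem.List.le_foldl_max _ _).1
    · exact (PySem.List.le_foldl_max _ _).2 _ ((h _).1 hx)
  · rcases pvFoldlMax_mem_or ys init with hy | hy
    · rw [hy]; exact (PySem.List.le_foldl_max _ _).1
    · exact (PySem.List.le_foldl_max _ _).2 _ ((h _).2 hy)

theorem pvMain (nums : List Int) : maxWaysToPartition nums = maxWaysToPartition_alt nums := by
  -- common data
  have hscan0 : nums.foldl pvScanStep ([0], (0 : Int)) = ([0] ++ pvPre nums 0, 0 + nums.sum) :=
    pvScan_eq nums [0] 0
  have hscan1 : nums.foldl pvScanStep ([], (0 : Int)) = ([] ++ pvPre nums 0, 0 + nums.sum) :=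
    pvScan_eq nums [] 0
  set P : List Int := (0 : Int) :: pvPre nums 0 with hP
  have hPA : (nums.foldl pvScanStep ([0], (0 : Int))).1 = P := by rw [hscan0]; simp [hP]
  have hPB : [0] ++ (nums.foldl pvScanStep ([], (0 : Int))).1 = P := by rw [hscan1]; simp [hP]
  set T : Int := PySem.List.pyGetD P (-1) 0 with hT
  set mids : List Int := (pvPre nums 0).dropLast with hmids
  set C : Int → Int := fun m => ((mids.count m : Nat) : Int) with hCdef
  have hC : ∀ m, 0 ≤ C m := by intro m; simp [hCdef]
  have hsliceA : PySem.List.slice P (some 1) (some (PySem.List.len nums)) = mids := by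
    rw [PySem.List.len_eq, hP, hmids, ← pvPre_length nums 0]
    exact pvSlice_one_n 0 (pvPre nums 0)
  have hsliceB : PySem.List.slice P (some 1) (some (-1)) = mids := by
    rw [hP, hmids]; exact pvSlice_one_neg_one 0 (pvPre nums 0)
  have hcounter :
      (PySem.List.slice P (some 1) (some (PySem.List.len nums))).foldl
          (fun d p => d.modify p 0 (· + 1)) PySem.Dict.empty
        = PySem.Dict.counter mids := by
    rw [hsliceA, PySem.Dict.counter_eq_foldl]
  set base : Int :=
    if PySem.Int.mod T 2 == 0 then C (PySem.Int.floordiv T 2) else 0 with hbase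
  have hbase0 : 0 ≤ base := by
    rw [hbase]; split
    · exact hC _
    · exact le_rfl
  -- reduce A
  have hA : maxWaysToPartition nums
      = nums.foldl (fun mp a => (pvCands C T (PySem.List.dedup nums) a).foldl max mp) base := by
    rw [maxWaysToPartition]
    simp only [hPA, hcounter, ← hT]
    rw [show PySem.List.slice P (some 1) none = pvPre nums 0 by
          rw [hP]; simpa using PySem.List.slice_from_one P]
    rw [← PySem.List.dedup_eq_ofList]
    have hbeq :
        (if PySem.Int.mod T 2 == 0 then (PySem.Dict.counter mids).getD (PySem.Int.floordiv T 2) 0 else 0)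
          = base := by
      rw [hbase]; simp [PySem.Dict.getD_counter, hCdef]
    rw [hbeq]
    exact pvOuterA_eq (PySem.List.len nums) T (PySem.List.dedup nums) C hC nums (pvPre nums 0) 0
      PySem.Dict.empty (PySem.Dict.counter mids) base
      (by intro m; simp [PySem.Dict.getD_empty, PySem.Dict.getD_counter, hCdef])
      hbase0 (by rw [pvPre_length])
  -- reduce B
  have hB : maxWaysToPartition_alt nums
      = (PySem.List.dedup nums).foldl
          (fun mp a => (pvCands C T (PySem.List.dedup nums) a).foldl max mp) base := by
    rw [maxWaysToPartition_alt]
    simp only [hPB, hsliceB, ← hT]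
    have hbeq :
        (if PySem.Int.mod T 2 == 0 then (PySem.Dict.counter mids).getD (PySem.Int.floordiv T 2) 0 else 0)
          = base := by
      rw [hbase]; simp [PySem.Dict.getD_counter, hCdef]
    rw [hbeq]
    apply PySem.List.foldl_congr_mem
    intro acc a _
    rw [pvInnerB_eq]
    have hfun : (fun m => (PySem.Dict.counter mids).getD m 0) = C := by
      funext m; simp [PySem.Dict.getD_counter, hCdef]
    rw [hfun]
  rw [hA, hB, pvFlat_eq, pvFlat_eq]
  apply pvFoldlMax_congr
  intro x
  simp only [List.mem_flatMap, PySem.List.mem_dedup]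

-- ===== VERDICT (by name: the statement is the Claim_ definition above) =====
theorem maxWaysToPartition_spec : Claim_equal_maxWaysToPartition := by
  intro nums _
  unfold Spec_maxWaysToPartition
  exact pvMain nums
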